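-- pv_equiv track=rewrite | github.com/Liang-Z8/DarkDialect | dark_cookies/adp.py | find_distict
-- ===== SOURCE A (Python) =====
-- def find_distict(dictionary):
--     """ Function to determine to return only distinct values in a dictionary, that is values which are not the same or a substring of any other value in the dictionary.
--     Empty string or None values are not returned.
--
--     Args:
--         dictionary (dict[int -> String]): the input dictionary mapping a key to a value.
--
--     Returns:
--         dict[int -> String]: a dictionary with only the distinct values kept.
--     """
--     # Remove any entries with an empty string or None value.
--     dictionary = {i:dictionary[i] for i in dictionary if dictionary[i] != None and dictionary[i].strip() != ""}
--     # Determine the set values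
--     array = set(dictionary.values())
--     # Create a temp dict to store the results
--     final_array = {a:dictionary[a] for a in dictionary}
--     # For each item in the dicionary
--     for item in dictionary:
--         # Get the value of item in the dict
--         value = dictionary[item]
--         # Get all the values that are not the item
--         not_item = array.difference({value})
--         # For each item that is not the value
--         for n in not_item:
--             # If the item is contained within (substring of) another item then
--             if value in n:
--                 # Remove the item fron the results
--                 if item in final_array:
--                     final_array.pop(item)
--     # Remove duplicates
--     temp = {val : key for key, val in final_array.items()}
--     res = {val : key for key, val in temp.items()}
--     return res
-- ===== SOURCE B (Python) =====
-- def find_distict(dictionary):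
--     # Keep non-blank values.
--     vals = {k: v for k, v in dictionary.items() if v is not None and v.strip() != ""}
--     # Index every proper substring of every distinct value once; a value
--     # survives iff it is absent from that index (no pairwise value scan).
--     proper = set()
--     for v in set(vals.values()):
--         n = len(v)
--         for i in range(n):
--             for j in range(i + 1, n + 1):
--                 if j - i < n:
--                     proper.add(v[i:j])
--     # Regroup surviving entries by value (later key wins), then flip back.
--     by_value = {}
--     for k, v in vals.items():
--         if v not in proper:
--             by_value[v] = k
--     return {k: v for v, k in by_value.items()}
-- ===== Notes on version B (the rewrite author's own statement) =====
-- stated objective: faster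
-- what changed: B replaces A's pairwise substring scan (which rebuilds a set.difference of all distinct values for every item) with a substring index: it enumerates every proper substring of every distinct value into one hash set, then decides each entry's survival by a single membership test, regrouping survivors by value in one pass instead of A's pop-from-a-copy loop and double dict inversion.
import Mathlib
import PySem

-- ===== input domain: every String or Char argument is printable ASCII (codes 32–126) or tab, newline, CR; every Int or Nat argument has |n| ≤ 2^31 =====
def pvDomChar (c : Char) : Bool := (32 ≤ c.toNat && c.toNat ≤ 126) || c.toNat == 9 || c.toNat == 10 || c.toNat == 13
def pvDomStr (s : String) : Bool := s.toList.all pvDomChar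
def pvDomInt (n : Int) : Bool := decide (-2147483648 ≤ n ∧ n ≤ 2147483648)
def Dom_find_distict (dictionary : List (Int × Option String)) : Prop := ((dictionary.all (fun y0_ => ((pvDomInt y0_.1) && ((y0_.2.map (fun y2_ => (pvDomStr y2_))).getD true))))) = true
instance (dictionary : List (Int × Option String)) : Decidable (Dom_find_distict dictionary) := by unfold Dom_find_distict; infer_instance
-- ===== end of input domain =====

-- B indexes every proper substring of every distinct value in one hash set and decides each entry's
-- survival by a single membership test, instead of A's pairwise substring scan with set.difference,
-- pop-from-a-copy and double dict inversion (objective: faster; measured faster in a timing run).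

-- ===== PORT A =====
-- the dict parameter read as a Python dict (later duplicate keys overwrite in place)
def pvAsDict (dictionary : List (Int × Option String)) : PySem.Dict Int (Option String) :=
  dictionary.foldl (fun d p => d.insert p.1 p.2) PySem.Dict.empty

-- {i: dictionary[i] for i in dictionary if dictionary[i] != None and dictionary[i].strip() != ""}
def pvFilterBlank (l : List (Int × Option String)) : PySem.Dict Int String :=
  l.foldl (fun acc p =>
    match p.2 with
    | none => acc
    | some s => if PySem.Str.strip s = "" then acc else acc.insert p.1 s) PySem.Dict.empty

def find_distict (dictionary : List (Int × Option String)) : List (Int × String) :=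
  let d : PySem.Dict Int String := pvFilterBlank (pvAsDict dictionary).items
  -- array = set(dictionary.values())
  let array : PySem.Set String := PySem.Set.ofList d.values
  -- final_array = {a: dictionary[a] for a in dictionary}
  let final0 : PySem.Dict Int String :=
    d.items.foldl (fun acc p => acc.insert p.1 p.2) PySem.Dict.empty
  -- for item in dictionary: value = dictionary[item]; not_item = array.difference({value});
  --   for n in not_item: if value in n: if item in final_array: final_array.pop(item)
  let final : PySem.Dict Int String :=
    d.items.foldl (fun f p =>
      let value := p.2
      let not_item := PySem.Set.diff array (PySem.Set.ofList [value])
      not_item.foldl (fun f n =>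
        if PySem.Str.isIn value n then
          if f.contains p.1 then f.erase p.1 else f
        else f) f) final0
  -- temp = {val: key for key, val in final_array.items()}; res = {val: key for key, val in temp.items()}
  let temp : PySem.Dict String Int :=
    final.items.foldl (fun t p => t.insert p.2 p.1) PySem.Dict.empty
  let res : PySem.Dict Int String :=
    temp.items.foldl (fun r p => r.insert p.2 p.1) PySem.Dict.empty
  res.items

-- ===== PORT B =====
def find_distict_alt (dictionary : List (Int × Option String)) : List (Int × String) :=
  -- vals = {k: v for k, v in dictionary.items() if v is not None and v.strip() != ""}
  let vals : PySem.Dict Int String := pvFilterBlank (pvAsDict dictionary).items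
  -- proper = set(); for v in set(vals.values()): for i in range(n): for j in range(i+1, n+1):
  --   if j - i < n: proper.add(v[i:j])
  let proper : PySem.Set String :=
    (PySem.Set.ofList vals.values).foldl (fun acc v =>
      (PySem.List.pyRange 0 (PySem.Str.len v) 1).foldl (fun acc i =>
        (PySem.List.pyRange (i + 1) (PySem.Str.len v + 1) 1).foldl (fun acc j =>
          if j - i < PySem.Str.len v then
            PySem.Set.add acc (PySem.Str.slice v (some i) (some j))
          else acc) acc) acc) PySem.Set.empty
  -- for k, v in vals.items(): if v not in proper: by_value[v] = k
  let byValue : PySem.Dict String Int :=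
    vals.items.foldl (fun t p =>
      if !(PySem.Set.contains proper p.2) then t.insert p.2 p.1 else t) PySem.Dict.empty
  -- return {k: v for v, k in by_value.items()}
  let res : PySem.Dict Int String :=
    byValue.items.foldl (fun r p => r.insert p.2 p.1) PySem.Dict.empty
  res.items

-- ===== PRECONDITION & SPEC =====
def Spec_find_distict (dictionary : List (Int × Option String)) (out : List (Int × String)) : Prop := out = find_distict_alt dictionary
instance (dictionary : List (Int × Option String)) (out : List (Int × String)) : Decidable (Spec_find_distict dictionary out) := by unfold Spec_find_distict; infer_instance

-- ===== CLAIM (what is proved, stated in full; the proofs are below) =====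
def Claim_equal_find_distict : Prop := ∀ (dictionary : List (Int × Option String)), Dom_find_distict dictionary → Spec_find_distict dictionary (find_distict dictionary)

-- ===== LEMMAS AND PROOFS =====

-- the filtering fold keeps dict keys unique
lemma pv_nodup_keys_filterFold (l : List (Int × Option String)) (acc : PySem.Dict Int String)
    (h : acc.keys.Nodup) :
    (l.foldl (fun acc p =>
      match p.2 with
      | none => acc
      | some s => if PySem.Str.strip s = "" then acc else acc.insert p.1 s) acc).keys.Nodup := by
  induction l generalizing acc with
  | nil => exact h
  | cons p l ih =>
    rcases p with ⟨k, v⟩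
    cases v with
    | none => exact ih _ h
    | some s =>
      by_cases hs : PySem.Str.strip s = ""
      · simpa [hs] using ih _ h
      · simpa [hs] using ih _ (PySem.Dict.nodup_keys_insert _ _ _ h)

lemma pv_nodup_keys (l : List (Int × Option String)) : (pvFilterBlank l).keys.Nodup :=
  pv_nodup_keys_filterFold l _ PySem.Dict.nodup_keys_empty

-- every value kept by the blank filter has a non-empty strip, hence is a non-empty string
lemma pv_values_strip_fold (l : List (Int × Option String)) (acc : PySem.Dict Int String)
    (h : ∀ v ∈ acc.values, PySem.Str.strip v ≠ "") :
    ∀ v ∈ (l.foldl (fun acc p =>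
      match p.2 with
      | none => acc
      | some s => if PySem.Str.strip s = "" then acc else acc.insert p.1 s) acc).values,
      PySem.Str.strip v ≠ "" := by
  induction l generalizing acc with
  | nil => exact h
  | cons p l ih =>
    rcases p with ⟨k, v⟩
    cases v with
    | none => exact ih _ h
    | some s =>
      by_cases hs : PySem.Str.strip s = ""
      · simpa [hs] using ih _ h
      · have h' : ∀ w ∈ (acc.insert k s).values, PySem.Str.strip w ≠ "" := by
          intro w hw
          rcases PySem.Dict.mem_values_insert _ _ _ _ hw with rfl | hw'
          · exact hs
          · exact h w hw'
        simpa [hs] using ih _ h'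

lemma pv_values_ne_nil (l : List (Int × Option String)) (v : String)
    (hv : v ∈ (pvFilterBlank l).values) : v.toList ≠ [] := by
  intro hnil
  have hs : PySem.Str.strip v ≠ "" :=
    pv_values_strip_fold l PySem.Dict.empty (by intro w hw; simp [PySem.Dict.values, PySem.Dict.empty] at hw) v hv
  apply hs
  apply String.toList_inj.mp
  rw [PySem.Str.toList_strip, hnil]
  rfl

-- copying a nodup-keyed dict item by item reproduces it
lemma pv_copy_eq (d : PySem.Dict Int String) (h : d.keys.Nodup) :
    d.items.foldl (fun acc p => acc.insert p.1 p.2) PySem.Dict.empty = d := by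
  apply PySem.Dict.ext
  have := PySem.Dict.items_foldl_insert_fresh d.items (fun p => p.1) (fun p => p.2)
    PySem.Dict.empty (by intro a _; exact PySem.Dict.contains_empty _) (by simpa [PySem.Dict.keys] using h)
  simpa using this

lemma pv_erase_absent (d : PySem.Dict Int String) (k : Int) (h : d.contains k = false) :
    d.erase k = d := by
  apply PySem.Dict.ext
  simp only [PySem.Dict.erase]
  apply List.filter_eq_self.mpr
  intro p hp
  simp only [PySem.Dict.contains, List.any_eq_false] at h
  simpa using h p hp

lemma pv_erase_idem (d : PySem.Dict Int String) (k : Int) :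
    (d.erase k).erase k = d.erase k := by
  apply PySem.Dict.ext
  simp [PySem.Dict.erase, List.filter_filter]

-- A's inner loop over not_item erases the key iff some member satisfies c
lemma pv_inner' (c : String → Bool) (l : List String) (k : Int) (f : PySem.Dict Int String) :
    l.foldl (fun f n => if c n then f.erase k else f) f
      = if l.any c then f.erase k else f := by
  induction l generalizing f with
  | nil => simp
  | cons n l ih =>
    cases hn : c n with
    | true => simp [hn, ih, pv_erase_idem]
    | false => simp [hn, ih]

lemma pv_inner (c : String → Bool) (l : List String) (k : Int) (f : PySem.Dict Int String) :
    l.foldl (fun f n => if c n then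
        (if f.contains k then f.erase k else f) else f) f
      = if l.any c then f.erase k else f := by
  have hstep : (fun (f : PySem.Dict Int String) n => if c n then
      (if f.contains k then f.erase k else f) else f)
      = fun f n => if c n then f.erase k else f := by
    funext g n
    by_cases hn : c n = true
    · by_cases hc : g.contains k = true
      · simp [hn, hc]
      · simp [hn, hc, pv_erase_absent g k (by simpa using hc)]
    · simp [hn]
  rw [hstep, pv_inner']

-- A's outer loop erases exactly the keys of items satisfying c
lemma pv_outer (c : Int × String → Bool) (l : List (Int × String)) (f : PySem.Dict Int String) :
    (l.foldl (fun f p => if c p then f.erase p.1 else f) f).items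
      = f.items.filter (fun q => !(l.any (fun p => c p && q.1 == p.1))) := by
  induction l generalizing f with
  | nil => simp
  | cons p l ih =>
    simp only [List.foldl_cons]
    by_cases hp : c p = true
    · rw [if_pos hp, ih]
      simp only [PySem.Dict.erase, List.filter_filter]
      apply List.filter_congr
      intro q _
      cases hq : (q.1 == p.1) <;>
        cases hl : l.any (fun p' => c p' && q.1 == p'.1) <;>
          simp [List.any_cons, hp, hq, hl]
    · have hp' : c p = false := by simpa using hp
      rw [if_neg (by simp [hp']), ih]
      apply List.filter_congr
      intro q _
      simp [List.any_cons, hp']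

-- a fold whose step adds (conditionally) elements collects exactly those elements
lemma pv_mem_foldl_step {β : Type} (P : β → String → Prop) (g : PySem.Set String → β → PySem.Set String)
    (hg : ∀ acc b x, x ∈ g acc b ↔ x ∈ acc ∨ P b x) (l : List β) (acc : PySem.Set String) (x : String) :
    x ∈ l.foldl g acc ↔ x ∈ acc ∨ ∃ b ∈ l, P b x := by
  induction l generalizing acc with
  | nil => simp
  | cons b l ih =>
    rw [List.foldl_cons, ih, hg]
    constructor
    · rintro (( h | h) | ⟨c, hc, hP⟩)
      · exact Or.inl h
      · exact Or.inr ⟨b, List.mem_cons_self, h⟩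
      · exact Or.inr ⟨c, List.mem_cons_of_mem _ hc, hP⟩
    · rintro (h | ⟨c, hc, hP⟩)
      · exact Or.inl (Or.inl h)
      · rcases List.mem_cons.mp hc with rfl | hc'
        · exact Or.inl (Or.inr hP)
        · exact Or.inr ⟨c, hc', hP⟩

-- the enumerated slices of v are exactly its non-empty proper infixes
lemma pv_slices_iff (v x : String) :
    (∃ i ∈ PySem.List.pyRange 0 (PySem.Str.len v) 1,
      ∃ j ∈ PySem.List.pyRange (i + 1) (PySem.Str.len v + 1) 1,
        (j - i < PySem.Str.len v ∧ PySem.Str.slice v (some i) (some j) = x))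
    ↔ (x.toList ≠ [] ∧ x.toList <:+: v.toList ∧ x.toList.length < v.toList.length) := by
  constructor
  · rintro ⟨i, hi, j, hj, hlt, hsl⟩
    rw [PySem.List.mem_pyRange_one] at hi hj
    rw [PySem.Str.len_eq] at hi hj hlt
    obtain ⟨i', rfl⟩ : ∃ n : ℕ, i = (n : Int) := ⟨i.toNat, (Int.toNat_of_nonneg hi.1).symm⟩
    obtain ⟨j', rfl⟩ : ∃ n : ℕ, j = (n : Int) := ⟨j.toNat, (Int.toNat_of_nonneg (by omega)).symm⟩
    have hij : i' < j' := by exact_mod_cast (by omega : (i' : Int) < j')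
    have hjle : j' ≤ v.toList.length := by exact_mod_cast (by omega : (j' : Int) ≤ v.toList.length)
    have hx : x.toList = (v.toList.drop i').take (j' - i') := by
      rw [← hsl, PySem.Str.toList_slice, PySem.Chars.slice_eq_listSlice, PySem.List.slice_natCast]
    have hxlen : x.toList.length = j' - i' := by
      rw [hx, List.length_take, List.length_drop]
      omega
    refine ⟨?_, ?_, ?_⟩
    · intro hnil; rw [hnil] at hxlen; simp at hxlen; omega
    · rw [hx]
      exact ((v.toList.drop i').take_prefix (j' - i')).isInfix.trans (v.toList.drop_suffix i').isInfix
    · rw [hxlen]; omega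
  · rintro ⟨hne, hinf, hlen⟩
    obtain ⟨s, t, hst⟩ := hinf
    have hvlen : v.toList.length = s.length + x.toList.length + t.length := by
      rw [← hst]; simp; omega
    have hxpos : 0 < x.toList.length := List.length_pos_iff.mpr hne
    refine ⟨(s.length : Int), ?_, ((s.length + x.toList.length : ℕ) : Int), ?_, ?_, ?_⟩
    · rw [PySem.List.mem_pyRange_one, PySem.Str.len_eq]
      constructor
      · exact_mod_cast Nat.zero_le _
      · exact_mod_cast (by omega : s.length < v.toList.length)
    · rw [PySem.List.mem_pyRange_one, PySem.Str.len_eq]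
      push_cast
      constructor <;> [omega; (exact_mod_cast (by omega : (s.length + x.toList.length : Int) < v.toList.length + 1))]
    · rw [PySem.Str.len_eq]; push_cast; omega
    · apply String.toList_inj.mp
      rw [PySem.Str.toList_slice, PySem.Chars.slice_eq_listSlice]
      have : ((s.length : Int) + (s.length + x.toList.length - s.length : ℕ)) = ((s.length + x.toList.length : ℕ) : Int) := by push_cast; omega
      rw [show ((s.length + x.toList.length : ℕ) : Int) = (s.length : Int) + ((x.toList.length : ℕ) : Int) by push_cast; ring]
      rw [PySem.List.slice_natCast_add, ← hst]
      rw [List.append_assoc, List.drop_left, List.take_left]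

-- membership in B's substring index, phrased as A's any-over-difference test
lemma pv_proper_contains (vs : List String) (v : String) (hne : v.toList ≠ []) :
    PySem.Set.contains
      ((PySem.Set.ofList vs).foldl (fun acc w =>
        (PySem.List.pyRange 0 (PySem.Str.len w) 1).foldl (fun acc i =>
          (PySem.List.pyRange (i + 1) (PySem.Str.len w + 1) 1).foldl (fun acc j =>
            if j - i < PySem.Str.len w then
              PySem.Set.add acc (PySem.Str.slice w (some i) (some j))
            else acc) acc) acc) PySem.Set.empty) v
    = (PySem.Set.diff (PySem.Set.ofList vs) (PySem.Set.ofList [v])).any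
        (fun n => PySem.Str.isIn v n) := by
  rw [Bool.eq_iff_iff]
  have hmem : ∀ (acc : PySem.Set String) (w : String) (x : String),
      x ∈ (PySem.List.pyRange 0 (PySem.Str.len w) 1).foldl (fun acc i =>
          (PySem.List.pyRange (i + 1) (PySem.Str.len w + 1) 1).foldl (fun acc j =>
            if j - i < PySem.Str.len w then
              PySem.Set.add acc (PySem.Str.slice w (some i) (some j))
            else acc) acc) acc
      ↔ x ∈ acc ∨ (x.toList ≠ [] ∧ x.toList <:+: w.toList ∧ x.toList.length < w.toList.length) := by
    intro acc w x
    rw [pv_mem_foldl_step (fun i x => ∃ j ∈ PySem.List.pyRange (i + 1) (PySem.Str.len w + 1) 1,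
        (j - i < PySem.Str.len w ∧ PySem.Str.slice w (some i) (some j) = x))]
    · rw [← pv_slices_iff w x]
    · intro acc i x
      rw [pv_mem_foldl_step (fun j x => (j - i < PySem.Str.len w ∧ PySem.Str.slice w (some i) (some j) = x))]
      intro acc j x
      split_ifs with hc
      · simp [PySem.Str.len_eq] at hc
        simp [PySem.Set.mem_add, hc, eq_comm]
      · simp [PySem.Str.len_eq] at hc
        simp [hc]
  simp only [PySem.Set.contains, List.contains_eq_mem, decide_eq_true_eq]
  rw [pv_mem_foldl_step _ _ hmem (PySem.Set.ofList vs) PySem.Set.empty v]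
  simp only [PySem.Set.mem_ofList, List.any_eq_true]
  constructor
  · rintro (h | ⟨w, hw, _, hinf, hlen⟩)
    · simp [PySem.Set.empty] at h
    · refine ⟨w, ?_, (PySem.Str.isIn_iff_infix v w).mpr hinf⟩
      have : w ≠ v := by
        intro h; subst h; omega
      simp only [PySem.Set.diff, List.mem_filter, PySem.Set.mem_ofList]
      constructor
      · exact hw
      · simp [this]
  · rintro ⟨w, hw, hin⟩
    simp only [PySem.Set.diff, List.mem_filter, PySem.Set.mem_ofList] at hw
    obtain ⟨hwvs, hwne⟩ := hw
    have hwne' : w ≠ v := by simpa using hwne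
    have hinf : v.toList <:+: w.toList := (PySem.Str.isIn_iff_infix v w).mp hin
    refine Or.inr ⟨w, hwvs, hne, hinf, ?_⟩
    rcases Nat.lt_or_ge v.toList.length w.toList.length with h | h
    · exact h
    · exfalso
      apply hwne'
      apply String.toList_inj.mp
      exact (hinf.eq_of_length (le_antisymm hinf.length_le h)).symm

-- ===== VERDICT (by name: the statement is the Claim_ definition above) =====
theorem find_distict_spec : Claim_equal_find_distict := by
  intro dictionary _
  unfold Spec_find_distict
  simp only [find_distict, find_distict_alt]
  set d : PySem.Dict Int String := pvFilterBlank (pvAsDict dictionary).items with hd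
  have hnd : d.keys.Nodup := pv_nodup_keys _
  have hndm : (d.items.map (fun p => p.1)).Nodup := by simpa [PySem.Dict.keys] using hnd
  rw [pv_copy_eq d hnd]
  have houter : (fun (f : PySem.Dict Int String) (p : Int × String) =>
      List.foldl (fun f n => if PySem.Str.isIn p.2 n then
          (if f.contains p.1 then f.erase p.1 else f) else f) f
        (PySem.Set.diff (PySem.Set.ofList d.values) (PySem.Set.ofList [p.2])))
      = fun f p => if (PySem.Set.diff (PySem.Set.ofList d.values)
          (PySem.Set.ofList [p.2])).any (fun n => PySem.Str.isIn p.2 n) then f.erase p.1 else f := by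
    funext f p
    exact pv_inner _ _ _ _
  rw [houter]
  rw [pv_outer (fun p => (PySem.Set.diff (PySem.Set.ofList d.values)
      (PySem.Set.ofList [p.2])).any (fun n => PySem.Str.isIn p.2 n)) d.items d]
  have hfc : d.items.filter (fun q => !(d.items.any (fun p =>
        (PySem.Set.diff (PySem.Set.ofList d.values) (PySem.Set.ofList [p.2])).any
          (fun n => PySem.Str.isIn p.2 n) && q.1 == p.1)))
      = d.items.filter (fun q => !((PySem.Set.diff (PySem.Set.ofList d.values)
          (PySem.Set.ofList [q.2])).any (fun n => PySem.Str.isIn q.2 n))) := by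
    apply List.filter_congr
    intro q hq
    have : (d.items.any (fun p =>
        (PySem.Set.diff (PySem.Set.ofList d.values) (PySem.Set.ofList [p.2])).any
          (fun n => PySem.Str.isIn p.2 n) && q.1 == p.1))
        = ((PySem.Set.diff (PySem.Set.ofList d.values) (PySem.Set.ofList [q.2])).any
          (fun n => PySem.Str.isIn q.2 n)) := by
      rw [Bool.eq_iff_iff]
      simp only [List.any_eq_true, Bool.and_eq_true, beq_iff_eq]
      constructor
      · rintro ⟨p, hp, hCp, hkey⟩
        have : p = q := List.inj_on_of_nodup_map hndm hp hq hkey.symm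
        subst this
        exact hCp
      · intro h
        exact ⟨q, hq, h, rfl⟩
    rw [this]
  rw [hfc]
  have hB : d.items.foldl (fun t p =>
      if !(PySem.Set.contains
        ((PySem.Set.ofList d.values).foldl (fun acc w =>
          (PySem.List.pyRange 0 (PySem.Str.len w) 1).foldl (fun acc i =>
            (PySem.List.pyRange (i + 1) (PySem.Str.len w + 1) 1).foldl (fun acc j =>
              if j - i < PySem.Str.len w then
                PySem.Set.add acc (PySem.Str.slice w (some i) (some j))
              else acc) acc) acc) PySem.Set.empty) p.2)
      then t.insert p.2 p.1 else t) PySem.Dict.empty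
      = d.items.foldl (fun t p =>
          if !((PySem.Set.diff (PySem.Set.ofList d.values) (PySem.Set.ofList [p.2])).any
            (fun n => PySem.Str.isIn p.2 n)) then t.insert p.2 p.1 else t) PySem.Dict.empty := by
    apply PySem.List.foldl_congr_mem
    intro acc p hp
    have hmem : p.2 ∈ d.values := by
      simp only [PySem.Dict.values]
      exact List.mem_map_of_mem hp
    rw [pv_proper_contains d.values p.2 (pv_values_ne_nil _ _ hmem)]
  rw [hB, ← List.foldl_filter]
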